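-- pv_equiv track=rewrite | github.com/gunnerbai/decompose_demo | demo7.py | get_jj_p2
-- ===== SOURCE A (Python) =====
-- def neighbours_x_y(x,y):
--     "Return 8-neighbours of image point P1(x,y), in a clockwise order"
--     # if  x=10.y=10   3点钟方向 逆时针 点位
--
--     x_1, y_1, x1, y1 = x-1, y-1, x+1, y+1
--      # p0        p1            p2               p3          p4              p5          p6             p7
--     return [[x,y1] ,[x_1,y1], [x_1,y],  [x_1,y_1], [x,y_1] , [x1,y_1],  [x1,y], [x1,y1]]
--
-- def get_jj_p2(bh,bihua_list):
--     ned_x = bh[0]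
--     ned_y = bh[1]
--     kaishi = neighbours_x_y(ned_x, ned_y)
--     for i in kaishi:
--         for j in range(len(bihua_list)):
--             for k in range(len(bihua_list[j])):
--                 if i[0] == bihua_list[j][k][0] and i[1] == bihua_list[j][k][1]:
--                     return i
-- ===== SOURCE B (Python) =====
-- _CW = [(0, 1), (-1, 1), (-1, 0), (-1, -1), (0, -1), (1, -1), (1, 0), (1, 1)]
-- _RANK = {(0, 1): 0, (-1, 1): 1, (-1, 0): 2, (-1, -1): 3, (0, -1): 4,
--          (1, -1): 5, (1, 0): 6, (1, 1): 7}
--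
--
-- def get_jj_p2(bh, bihua_list):
--     # Single pass over all stroke points: give each point its clockwise rank
--     # relative to (bh[0], bh[1]) (None if it is not an 8-neighbour), keep the
--     # smallest rank seen, and rebuild that neighbour's coordinates at the end.
--     x = bh[0]
--     y = bh[1]
--     best = None
--     for stroke in bihua_list:
--         for p in stroke:
--             if len(p) >= 2:
--                 r = _RANK.get((p[0] - x, p[1] - y))
--                 if r is not None and (best is None or r < best):
--                     best = r
--     if best is not None:
--         dx, dy = _CW[best]
--         return [x + dx, y + dy]
-- ===== Notes on version B (the rewrite author's own statement) =====
-- stated objective: alternative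
-- what changed: B inverts the iteration: instead of looping over the 8 neighbours and rescanning the nested stroke structure for each, it makes one pass over all stroke points, assigns each point its clockwise rank relative to bh via an offset->rank table, keeps the minimum rank in an accumulator, and reconstructs that neighbour at the end; the minimum rank equals A's first-hit clockwise tie-break.
-- outside the precondition, e.g. on get_jj_p2([0, 0], [[[0, 1], [0]]]): A returns [0, 1], B returns [0, 1]; on get_jj_p2([0, 0], [[[0, 1]], [[1]]]): A returns [0, 1], B returns [0, 1]
import Mathlib
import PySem

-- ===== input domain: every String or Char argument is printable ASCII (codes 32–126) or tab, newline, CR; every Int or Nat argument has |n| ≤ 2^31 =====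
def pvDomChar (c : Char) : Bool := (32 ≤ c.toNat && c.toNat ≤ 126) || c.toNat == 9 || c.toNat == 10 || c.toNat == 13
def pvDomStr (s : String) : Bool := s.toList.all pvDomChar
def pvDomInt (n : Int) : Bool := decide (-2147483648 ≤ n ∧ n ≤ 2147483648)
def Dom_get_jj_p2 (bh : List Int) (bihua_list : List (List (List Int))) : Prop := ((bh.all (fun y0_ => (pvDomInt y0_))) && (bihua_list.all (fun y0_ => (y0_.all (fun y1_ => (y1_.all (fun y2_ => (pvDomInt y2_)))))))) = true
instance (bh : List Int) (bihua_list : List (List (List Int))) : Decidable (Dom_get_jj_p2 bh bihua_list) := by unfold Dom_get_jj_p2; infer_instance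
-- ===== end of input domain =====

-- B replaces A's neighbour-by-neighbour rescans by one pass over all stroke points keeping the minimum clockwise rank (objective: alternative algorithm; return-value equivalence).


-- ===== PORT A =====
def neighbours_x_y (x y : Int) : List (List Int) :=
  [[x, y+1], [x-1, y+1], [x-1, y], [x-1, y-1], [x, y-1], [x+1, y-1], [x+1, y], [x+1, y+1]]

-- i[0] == pt[0] and i[1] == pt[1], with Python's short-circuit 'and'; a failed index is a raise (port: false, outside Pre_)
def pvA_match (i pt : List Int) : Bool :=
  match PySem.List.pyGet? i 0, PySem.List.pyGet? pt 0 with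
  | some a, some b =>
    if a == b then
      match PySem.List.pyGet? i 1, PySem.List.pyGet? pt 1 with
      | some c, some d => c == d
      | _, _ => false
    else false
  | _, _ => false

-- inner 'for k in range(len(bihua_list[j]))' loop
def pvA_inStroke (i : List Int) : List (List Int) → Bool
  | [] => false
  | pt :: rest => if pvA_match i pt then true else pvA_inStroke i rest

-- 'for j in range(len(bihua_list))' loop
def pvA_inStrokes (i : List Int) : List (List (List Int)) → Bool
  | [] => false
  | s :: rest => if pvA_inStroke i s then true else pvA_inStrokes i rest

-- outer 'for i in kaishi: … return i' loop
def pvA_first (bl : List (List (List Int))) : List (List Int) → Option (List Int)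
  | [] => none
  | i :: rest => if pvA_inStrokes i bl then some i else pvA_first bl rest

def get_jj_p2 (bh : List Int) (bihua_list : List (List (List Int))) : Option (List Int) :=
  match PySem.List.pyGet? bh 0, PySem.List.pyGet? bh 1 with
  | some x, some y => pvA_first bihua_list (neighbours_x_y x y)
  | _, _ => none

-- ===== PORT B =====
def pvCW : List (Int × Int) := [(0,1), (-1,1), (-1,0), (-1,-1), (0,-1), (1,-1), (1,0), (1,1)]

def pvRANK : PySem.Dict (Int × Int) Int :=
  PySem.Dict.ofList [((0,1),0), ((-1,1),1), ((-1,0),2), ((-1,-1),3), ((0,-1),4), ((1,-1),5), ((1,0),6), ((1,1),7)]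

-- body of the inner 'for p in stroke' loop: _RANK.get + min-accumulator update
def pvB_step (x y : Int) (best : Option Int) (p : List Int) : Option Int :=
  if 2 ≤ p.length then
    match PySem.List.pyGet? p 0, PySem.List.pyGet? p 1 with
    | some a, some b =>
      match PySem.Dict.get? pvRANK (a - x, b - y) with
      | some r => match best with
                  | none => some r
                  | some m => if r < m then some r else some m
      | none => best
    | _, _ => best
  else best

def get_jj_p2_alt (bh : List Int) (bihua_list : List (List (List Int))) : Option (List Int) :=
  match PySem.List.pyGet? bh 0, PySem.List.pyGet? bh 1 with
  | some x, some y =>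
    match bihua_list.foldl (fun acc stroke => stroke.foldl (pvB_step x y) acc) none with
    | none => none
    | some r =>
      match PySem.List.pyGet? pvCW r with
      | some (dx, dy) => some [x + dx, y + dy]
      | none => none
  | _, _ => none

-- ===== PRECONDITION & SPEC =====
-- Pre_ excludes the inputs on which A's indexing raises: bh shorter than 2, an empty stroke point, or a
-- 1-element stroke point whose coordinate is within 1 of bh[0] (there A evaluates p[1] on a first-coordinate hit).
-- A's raising is execution-order-dependent (a point after an early return is never touched), so this closed-form
-- condition is conservative: it also excludes some inputs on which A returns; B returns A's value on those too.
def Pre_get_jj_p2 (bh : List Int) (bihua_list : List (List (List Int))) : Prop :=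
  2 ≤ bh.length ∧ ∀ s ∈ bihua_list, ∀ p ∈ s,
    1 ≤ p.length ∧ (2 ≤ p.length ∨ p.headI ∉ [bh.headI - 1, bh.headI, bh.headI + 1])
instance (bh : List Int) (bihua_list : List (List (List Int))) : Decidable (Pre_get_jj_p2 bh bihua_list) := by unfold Pre_get_jj_p2; infer_instance
def pvWitness_get_jj_p2 : List Int × List (List (List Int)) := ([0, 0], [[[1, 1], [5, 5], [9]], [[0, -1]]])

def Spec_get_jj_p2 (bh : List Int) (bihua_list : List (List (List Int))) (out : Option (List Int)) : Prop := out = get_jj_p2_alt bh bihua_list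
instance (bh : List Int) (bihua_list : List (List (List Int))) (out : Option (List Int)) : Decidable (Spec_get_jj_p2 bh bihua_list out) := by unfold Spec_get_jj_p2; infer_instance

-- ===== CLAIM (what is proved, stated in full; the proofs are below) =====
def Claim_equal_get_jj_p2 : Prop := ∀ (bh : List Int) (bihua_list : List (List (List Int))), Dom_get_jj_p2 bh bihua_list → Pre_get_jj_p2 bh bihua_list → Spec_get_jj_p2 bh bihua_list (get_jj_p2 bh bihua_list)

-- ===== LEMMAS AND PROOFS =====

-- proof-side pure rank of a point (the value pvB_step folds with)
def pvRank (x y : Int) (p : List Int) : Option Int :=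
  if 2 ≤ p.length then PySem.Dict.get? pvRANK (p.headI - x, p.tail.headI - y) else none

-- proof-side min-accumulator step
def pvMinF (b : Option Int) (r : Int) : Option Int :=
  match b with
  | none => some r
  | some m => if r < m then some r else some m

-- the rank multiset B's pass ranges over
def pvR (x y : Int) (bl : List (List (List Int))) : List Int :=
  bl.flatMap (fun s => s.filterMap (pvRank x y))

theorem pvGet0 (a : Int) (t : List Int) : PySem.List.pyGet? (a :: t) (0 : Int) = some a := by
  simp [PySem.List.pyGet?, PySem.List.pyIdx?]

theorem pvGet1 (a b : Int) (t : List Int) : PySem.List.pyGet? (a :: b :: t) (1 : Int) = some b := by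
  simp [PySem.List.pyGet?, PySem.List.pyIdx?]

theorem pvB_step_eq (x y : Int) (best : Option Int) (p : List Int) :
    pvB_step x y best p = match pvRank x y p with
      | none => best
      | some r => pvMinF best r := by
  match p with
  | [] => simp [pvB_step, pvRank]
  | [a] => simp [pvB_step, pvRank]
  | a :: b :: t =>
    simp only [pvB_step, pvRank, pvGet0, pvGet1, List.length_cons, List.headI, List.tail]
    have h2 : 2 ≤ t.length + 1 + 1 := by omega
    simp only [if_pos h2]
    cases PySem.Dict.get? pvRANK (a - x, b - y) with
    | none => rfl
    | some r => cases best <;> rfl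

theorem pvB_foldl_stroke (x y : Int) (acc : Option Int) (s : List (List Int)) :
    s.foldl (pvB_step x y) acc = (s.filterMap (pvRank x y)).foldl pvMinF acc := by
  induction s generalizing acc with
  | nil => rfl
  | cons p rest ih =>
    rw [List.foldl_cons, List.filterMap_cons, pvB_step_eq]
    cases h : pvRank x y p with
    | none => simpa using ih acc
    | some r => simp [ih]

theorem pvB_foldl_all (x y : Int) (bl : List (List (List Int))) :
    bl.foldl (fun a s => s.foldl (pvB_step x y) a) none = (pvR x y bl).foldl pvMinF none := by
  suffices h : ∀ acc, bl.foldl (fun a s => s.foldl (pvB_step x y) a) acc = (pvR x y bl).foldl pvMinF acc from h none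
  unfold pvR
  induction bl with
  | nil => intro acc; rfl
  | cons s rest ih =>
    intro acc
    rw [List.foldl_cons, List.flatMap_cons, List.foldl_append, pvB_foldl_stroke]
    exact ih _

theorem pvMinF_foldl_some (a : Int) (l : List Int) :
    l.foldl pvMinF (some a) = some (l.foldl min a) := by
  induction l generalizing a with
  | nil => rfl
  | cons r rest ih =>
    rw [List.foldl_cons, List.foldl_cons, ← ih]
    congr 1
    simp only [pvMinF]
    by_cases h : r < a
    · simp [h, min_eq_right h.le]
    · simp [h, min_eq_left (not_lt.mp h)]

theorem pvMinF_foldl_min? (l : List Int) : l.foldl pvMinF none = l.min? := by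
  cases l with
  | nil => rfl
  | cons a rest =>
    rw [List.foldl_cons]
    show rest.foldl pvMinF (some a) = (a :: rest).min?
    rw [pvMinF_foldl_some, List.min?_cons']

-- the rank table, unfolded over a symbolic key
theorem pvRANK_get (u v : Int) :
    PySem.Dict.get? pvRANK (u, v) =
      if ((0:Int),(1:Int)) = (u,v) then some 0 else if ((-1:Int),(1:Int)) = (u,v) then some 1
      else if ((-1:Int),(0:Int)) = (u,v) then some 2 else if ((-1:Int),(-1:Int)) = (u,v) then some 3
      else if ((0:Int),(-1:Int)) = (u,v) then some 4 else if ((1:Int),(-1:Int)) = (u,v) then some 5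
      else if ((1:Int),(0:Int)) = (u,v) then some 6 else if ((1:Int),(1:Int)) = (u,v) then some 7 else none := by
  have h : pvRANK = PySem.Dict.mk [((0,1),0), ((-1,1),1), ((-1,0),2), ((-1,-1),3), ((0,-1),4), ((1,-1),5), ((1,0),6), ((1,1),7)] := by decide
  rw [h]
  simp only [PySem.Dict.get?_mk_cons, beq_iff_eq]
  simp [PySem.Dict.get?]

theorem pvRank_bounds (x y r : Int) (p : List Int) (h : pvRank x y p = some r) :
    0 ≤ r ∧ r ≤ 7 := by
  unfold pvRank at h
  split at h
  · rw [pvRANK_get] at h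
    split_ifs at h <;> injection h with h <;> omega
  · simp at h

-- pvRank x y p = some k ↔ the point is (the first two coordinates of) the k-th clockwise neighbour
theorem pvRank_eq0 (x y : Int) (p : List Int) :
    pvRank x y p = some 0 ↔ 2 ≤ p.length ∧ p.headI = x ∧ p.tail.headI = y + 1 := by
  unfold pvRank
  by_cases hl : 2 ≤ p.length
  · rw [if_pos hl, pvRANK_get]
    constructor
    · intro h
      split_ifs at h with h1 h2 h3 h4 h5 h6 h7 h8
      all_goals try exact absurd h (by decide)
      simp only [Prod.mk.injEq] at h1
      exact ⟨hl, by omega, by omega⟩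
    · rintro ⟨-, e1, e2⟩
      simp only [e1, e2, Prod.mk.injEq]
      norm_num
  · simp [hl]

theorem pvRank_eq1 (x y : Int) (p : List Int) :
    pvRank x y p = some 1 ↔ 2 ≤ p.length ∧ p.headI = x - 1 ∧ p.tail.headI = y + 1 := by
  unfold pvRank
  by_cases hl : 2 ≤ p.length
  · rw [if_pos hl, pvRANK_get]
    constructor
    · intro h
      split_ifs at h with h1 h2 h3 h4 h5 h6 h7 h8
      all_goals try exact absurd h (by decide)
      simp only [Prod.mk.injEq] at h2
      exact ⟨hl, by omega, by omega⟩
    · rintro ⟨-, e1, e2⟩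
      simp only [e1, e2, Prod.mk.injEq]
      norm_num
  · simp [hl]

theorem pvRank_eq2 (x y : Int) (p : List Int) :
    pvRank x y p = some 2 ↔ 2 ≤ p.length ∧ p.headI = x - 1 ∧ p.tail.headI = y := by
  unfold pvRank
  by_cases hl : 2 ≤ p.length
  · rw [if_pos hl, pvRANK_get]
    constructor
    · intro h
      split_ifs at h with h1 h2 h3 h4 h5 h6 h7 h8
      all_goals try exact absurd h (by decide)
      simp only [Prod.mk.injEq] at h3
      exact ⟨hl, by omega, by omega⟩
    · rintro ⟨-, e1, e2⟩
      simp only [e1, e2, Prod.mk.injEq]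
      norm_num
  · simp [hl]

theorem pvRank_eq3 (x y : Int) (p : List Int) :
    pvRank x y p = some 3 ↔ 2 ≤ p.length ∧ p.headI = x - 1 ∧ p.tail.headI = y - 1 := by
  unfold pvRank
  by_cases hl : 2 ≤ p.length
  · rw [if_pos hl, pvRANK_get]
    constructor
    · intro h
      split_ifs at h with h1 h2 h3 h4 h5 h6 h7 h8
      all_goals try exact absurd h (by decide)
      simp only [Prod.mk.injEq] at h4
      exact ⟨hl, by omega, by omega⟩
    · rintro ⟨-, e1, e2⟩
      simp only [e1, e2, Prod.mk.injEq]
      norm_num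
  · simp [hl]

theorem pvRank_eq4 (x y : Int) (p : List Int) :
    pvRank x y p = some 4 ↔ 2 ≤ p.length ∧ p.headI = x ∧ p.tail.headI = y - 1 := by
  unfold pvRank
  by_cases hl : 2 ≤ p.length
  · rw [if_pos hl, pvRANK_get]
    constructor
    · intro h
      split_ifs at h with h1 h2 h3 h4 h5 h6 h7 h8
      all_goals try exact absurd h (by decide)
      simp only [Prod.mk.injEq] at h5
      exact ⟨hl, by omega, by omega⟩
    · rintro ⟨-, e1, e2⟩
      simp only [e1, e2, Prod.mk.injEq]
      norm_num
  · simp [hl]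

theorem pvRank_eq5 (x y : Int) (p : List Int) :
    pvRank x y p = some 5 ↔ 2 ≤ p.length ∧ p.headI = x + 1 ∧ p.tail.headI = y - 1 := by
  unfold pvRank
  by_cases hl : 2 ≤ p.length
  · rw [if_pos hl, pvRANK_get]
    constructor
    · intro h
      split_ifs at h with h1 h2 h3 h4 h5 h6 h7 h8
      all_goals try exact absurd h (by decide)
      simp only [Prod.mk.injEq] at h6
      exact ⟨hl, by omega, by omega⟩
    · rintro ⟨-, e1, e2⟩
      simp only [e1, e2, Prod.mk.injEq]
      norm_num
  · simp [hl]

theorem pvRank_eq6 (x y : Int) (p : List Int) :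
    pvRank x y p = some 6 ↔ 2 ≤ p.length ∧ p.headI = x + 1 ∧ p.tail.headI = y := by
  unfold pvRank
  by_cases hl : 2 ≤ p.length
  · rw [if_pos hl, pvRANK_get]
    constructor
    · intro h
      split_ifs at h with h1 h2 h3 h4 h5 h6 h7 h8
      all_goals try exact absurd h (by decide)
      simp only [Prod.mk.injEq] at h7
      exact ⟨hl, by omega, by omega⟩
    · rintro ⟨-, e1, e2⟩
      simp only [e1, e2, Prod.mk.injEq]
      norm_num
  · simp [hl]

theorem pvRank_eq7 (x y : Int) (p : List Int) :
    pvRank x y p = some 7 ↔ 2 ≤ p.length ∧ p.headI = x + 1 ∧ p.tail.headI = y + 1 := by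
  unfold pvRank
  by_cases hl : 2 ≤ p.length
  · rw [if_pos hl, pvRANK_get]
    constructor
    · intro h
      split_ifs at h with h1 h2 h3 h4 h5 h6 h7 h8
      all_goals try exact absurd h (by decide)
      simp only [Prod.mk.injEq] at h8
      exact ⟨hl, by omega, by omega⟩
    · rintro ⟨-, e1, e2⟩
      simp only [e1, e2, Prod.mk.injEq]
      norm_num
  · simp [hl]

-- pvA_match under Pre_'s point shape, against a neighbour [a, b] with a within 1 of x
theorem pvA_match_iff (x a b : Int) (p : List Int)
    (ha : a ∈ [x - 1, x, x + 1]) (h1 : 1 ≤ p.length)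
    (h2 : 2 ≤ p.length ∨ p.headI ∉ [x - 1, x, x + 1]) :
    pvA_match [a, b] p = true ↔ 2 ≤ p.length ∧ p.headI = a ∧ p.tail.headI = b := by
  match p, h1 with
  | [p0], _ =>
    have hne : ¬ (a = p0) := by
      rcases h2 with h2 | h2
      · simp at h2
      · intro h; rw [← h] at h2; exact h2 ha
    simp [pvA_match, hne]
  | p0 :: p1 :: t, _ =>
    simp only [pvA_match, pvGet0, pvGet1, List.length_cons, List.headI, List.tail]
    constructor
    · intro h
      by_cases hp : a = p0
      · simp only [hp, beq_self_eq_true, if_true, beq_iff_eq] at h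
        exact ⟨by omega, hp.symm, h.symm⟩
      · simp [show (a == p0) = false from by simpa using hp] at h
    · rintro ⟨-, h0, h1⟩
      simp [h0, h1]

theorem pvA_inStrokes_iff (i : List Int) (bl : List (List (List Int))) :
    pvA_inStrokes i bl = true ↔ ∃ s ∈ bl, ∃ p ∈ s, pvA_match i p = true := by
  induction bl with
  | nil => simp [pvA_inStrokes]
  | cons s rest ih =>
    have hstroke : pvA_inStroke i s = true ↔ ∃ p ∈ s, pvA_match i p = true := by
      induction s with
      | nil => simp [pvA_inStroke]
      | cons p r ihp =>
        simp only [pvA_inStroke]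
        by_cases h : pvA_match i p = true <;> simp [h, ihp]
    simp only [pvA_inStrokes]
    by_cases h : pvA_inStroke i s = true
    · simp only [h, if_true, true_iff]
      exact ⟨s, List.mem_cons_self, hstroke.mp h⟩
    · have h' : pvA_inStroke i s = false := by simpa using h
      rw [h']
      show pvA_inStrokes i rest = true ↔ _
      rw [ih]
      constructor
      · rintro ⟨s', hs', hp⟩
        exact ⟨s', List.mem_cons_of_mem _ hs', hp⟩
      · rintro ⟨s', hs', p, hp, hm⟩
        rcases List.mem_cons.mp hs' with rfl | hs'
        · exact absurd (hstroke.mpr ⟨p, hp, hm⟩) h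
        · exact ⟨s', hs', p, hp, hm⟩

-- A's membership flag for a neighbour coincides with that neighbour's rank being in B's rank multiset
theorem pvMem_iff (x y a b k : Int) (bl : List (List (List Int)))
    (hP : ∀ s ∈ bl, ∀ p ∈ s, 1 ≤ p.length ∧ (2 ≤ p.length ∨ p.headI ∉ [x - 1, x, x + 1]))
    (ha : a ∈ [x - 1, x, x + 1])
    (hrank : ∀ p : List Int, pvRank x y p = some k ↔ 2 ≤ p.length ∧ p.headI = a ∧ p.tail.headI = b) :
    (pvA_inStrokes [a, b] bl = true ↔ k ∈ pvR x y bl) := by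
  rw [pvA_inStrokes_iff]
  constructor
  · rintro ⟨s, hs, p, hp, hm⟩
    have hsh := hP s hs p hp
    have h := (pvA_match_iff x a b p ha hsh.1 hsh.2).mp hm
    exact List.mem_flatMap.mpr ⟨s, hs, List.mem_filterMap.mpr ⟨p, hp, (hrank p).mpr h⟩⟩
  · intro hk
    rcases List.mem_flatMap.mp hk with ⟨s, hs, hin⟩
    rcases List.mem_filterMap.mp hin with ⟨p, hp, hr⟩
    have h := (hrank p).mp hr
    have hsh := hP s hs p hp
    exact ⟨s, hs, p, hp, (pvA_match_iff x a b p ha hsh.1 hsh.2).mpr h⟩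

theorem pvC_true {c : Bool} {P : Prop} (h : c = true ↔ P) (hp : P) : c = true := h.mpr hp
theorem pvC_false {c : Bool} {P : Prop} (h : c = true ↔ P) (hn : ¬ P) : c = false := by
  cases hc : c
  · rfl
  · exact absurd (h.mp hc) hn

-- ===== VERDICT (by name: the statement is the Claim_ definition above) =====
theorem get_jj_p2_spec : Claim_equal_get_jj_p2 := by
  intro bh bl _ hPre
  obtain ⟨hlen, hP0⟩ := hPre
  unfold Spec_get_jj_p2
  match bh, hlen with
  | x :: y :: t, _ =>
    have hP : ∀ s ∈ bl, ∀ p ∈ s, 1 ≤ p.length ∧ (2 ≤ p.length ∨ p.headI ∉ [x - 1, x, x + 1]) := by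
      simpa using hP0
    unfold get_jj_p2 get_jj_p2_alt
    simp only [pvGet0, pvGet1]
    rw [pvB_foldl_all, pvMinF_foldl_min?]
    have C0 := pvMem_iff x y x (y+1) 0 bl hP (by simp) (pvRank_eq0 x y)
    have C1 := pvMem_iff x y (x-1) (y+1) 1 bl hP (by simp) (pvRank_eq1 x y)
    have C2 := pvMem_iff x y (x-1) y 2 bl hP (by simp) (pvRank_eq2 x y)
    have C3 := pvMem_iff x y (x-1) (y-1) 3 bl hP (by simp) (pvRank_eq3 x y)
    have C4 := pvMem_iff x y x (y-1) 4 bl hP (by simp) (pvRank_eq4 x y)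
    have C5 := pvMem_iff x y (x+1) (y-1) 5 bl hP (by simp) (pvRank_eq5 x y)
    have C6 := pvMem_iff x y (x+1) y 6 bl hP (by simp) (pvRank_eq6 x y)
    have C7 := pvMem_iff x y (x+1) (y+1) 7 bl hP (by simp) (pvRank_eq7 x y)
    cases hmin : (pvR x y bl).min? with
    | none =>
      have hempty : pvR x y bl = [] := List.min?_eq_none_iff.mp hmin
      have h0 := pvC_false C0 (by simp [hempty])
      have h1 := pvC_false C1 (by simp [hempty])
      have h2 := pvC_false C2 (by simp [hempty])
      have h3 := pvC_false C3 (by simp [hempty])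
      have h4 := pvC_false C4 (by simp [hempty])
      have h5 := pvC_false C5 (by simp [hempty])
      have h6 := pvC_false C6 (by simp [hempty])
      have h7 := pvC_false C7 (by simp [hempty])
      simp [pvA_first, neighbours_x_y, h0, h1, h2, h3, h4, h5, h6, h7]
    | some m =>
      rcases List.min?_eq_some_iff.mp hmin with ⟨hmem, hle⟩
      have hb : 0 ≤ m ∧ m ≤ 7 := by
        rcases List.mem_flatMap.mp hmem with ⟨s, -, hin⟩
        rcases List.mem_filterMap.mp hin with ⟨p, -, hr⟩
        exact pvRank_bounds x y m p hr
      have hnot : ∀ j : Int, j < m → j ∉ pvR x y bl := by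
        intro j hj hmemj
        exact absurd (hle j hmemj) (by omega)
      obtain ⟨hb0, hb7⟩ := hb
      interval_cases m
      · have h0 := pvC_true C0 hmem
        simp [pvA_first, neighbours_x_y, h0, pvCW, PySem.List.pyGet?, PySem.List.pyIdx?]
      · have h0 := pvC_false C0 (hnot 0 (by omega))
        have h1 := pvC_true C1 hmem
        try simp only [sub_eq_add_neg] at h0 h1
        simp [pvA_first, neighbours_x_y, h0, h1, pvCW, PySem.List.pyGet?, PySem.List.pyIdx?, sub_eq_add_neg]
      · have h0 := pvC_false C0 (hnot 0 (by omega))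
        have h1 := pvC_false C1 (hnot 1 (by omega))
        have h2 := pvC_true C2 hmem
        try simp only [sub_eq_add_neg] at h0 h1 h2
        simp [pvA_first, neighbours_x_y, h0, h1, h2, pvCW, PySem.List.pyGet?, PySem.List.pyIdx?, sub_eq_add_neg]
      · have h0 := pvC_false C0 (hnot 0 (by omega))
        have h1 := pvC_false C1 (hnot 1 (by omega))
        have h2 := pvC_false C2 (hnot 2 (by omega))
        have h3 := pvC_true C3 hmem
        try simp only [sub_eq_add_neg] at h0 h1 h2 h3
        simp [pvA_first, neighbours_x_y, h0, h1, h2, h3, pvCW, PySem.List.pyGet?, PySem.List.pyIdx?, sub_eq_add_neg]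
      · have h0 := pvC_false C0 (hnot 0 (by omega))
        have h1 := pvC_false C1 (hnot 1 (by omega))
        have h2 := pvC_false C2 (hnot 2 (by omega))
        have h3 := pvC_false C3 (hnot 3 (by omega))
        have h4 := pvC_true C4 hmem
        try simp only [sub_eq_add_neg] at h0 h1 h2 h3 h4
        simp [pvA_first, neighbours_x_y, h0, h1, h2, h3, h4, pvCW, PySem.List.pyGet?, PySem.List.pyIdx?, sub_eq_add_neg]
      · have h0 := pvC_false C0 (hnot 0 (by omega))
        have h1 := pvC_false C1 (hnot 1 (by omega))
        have h2 := pvC_false C2 (hnot 2 (by omega))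
        have h3 := pvC_false C3 (hnot 3 (by omega))
        have h4 := pvC_false C4 (hnot 4 (by omega))
        have h5 := pvC_true C5 hmem
        try simp only [sub_eq_add_neg] at h0 h1 h2 h3 h4 h5
        simp [pvA_first, neighbours_x_y, h0, h1, h2, h3, h4, h5, pvCW, PySem.List.pyGet?, PySem.List.pyIdx?, sub_eq_add_neg]
      · have h0 := pvC_false C0 (hnot 0 (by omega))
        have h1 := pvC_false C1 (hnot 1 (by omega))
        have h2 := pvC_false C2 (hnot 2 (by omega))
        have h3 := pvC_false C3 (hnot 3 (by omega))
        have h4 := pvC_false C4 (hnot 4 (by omega))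
        have h5 := pvC_false C5 (hnot 5 (by omega))
        have h6 := pvC_true C6 hmem
        try simp only [sub_eq_add_neg] at h0 h1 h2 h3 h4 h5 h6
        simp [pvA_first, neighbours_x_y, h0, h1, h2, h3, h4, h5, h6, pvCW, PySem.List.pyGet?, PySem.List.pyIdx?, sub_eq_add_neg]
      · have h0 := pvC_false C0 (hnot 0 (by omega))
        have h1 := pvC_false C1 (hnot 1 (by omega))
        have h2 := pvC_false C2 (hnot 2 (by omega))
        have h3 := pvC_false C3 (hnot 3 (by omega))
        have h4 := pvC_false C4 (hnot 4 (by omega))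
        have h5 := pvC_false C5 (hnot 5 (by omega))
        have h6 := pvC_false C6 (hnot 6 (by omega))
        have h7 := pvC_true C7 hmem
        try simp only [sub_eq_add_neg] at h0 h1 h2 h3 h4 h5 h6 h7
        simp [pvA_first, neighbours_x_y, h0, h1, h2, h3, h4, h5, h6, h7, pvCW, PySem.List.pyGet?, PySem.List.pyIdx?, sub_eq_add_neg]
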